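-- pv_equiv track=rewrite | github.com/SanPen/GridCal | src/GridCal/Engine/IO/cim_parser.py | sort_cim_files
-- ===== SOURCE A (Python) =====
-- def sort_cim_files(file_names):
--     """
--     Sorts the CIM files in the preferred reading order
--     :param file_names: lis of file names
--     :return: sorted list of file names
--     """
--     # sort the files
--     lst = list()
--     nn = len(file_names)
--     for i in range(nn - 1, -1, -1):
--         f = file_names[i]
--         if 'TP' in f or 'TPDB' in f:
--             lst.append(file_names.pop(i))
--
--     nn = len(file_names)
--     for i in range(nn - 1, -1, -1):
--         f = file_names[i]
--         if 'EQ' in f or 'EQBD' in f: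
--             lst.append(file_names.pop(i))
--
--     lst2 = lst + file_names
--
--     return lst2
-- ===== SOURCE B (Python) =====
-- def sort_cim_files(file_names):
--     """
--     Sorts the CIM files in the preferred reading order
--     :param file_names: lis of file names
--     :return: sorted list of file names
--     """
--     # one pass: classify into buckets; TP files first (in reverse input
--     # order, matching the original's back-to-front scan), then EQ files
--     # (also reversed), then the rest in input order.
--     tp, eq, rest = [], [], []
--     for f in file_names:
--         if 'TP' in f:
--             tp.append(f)
--         elif 'EQ' in f:
--             eq.append(f)
--         else:
--             rest.append(f)
--     return tp[::-1] + eq[::-1] + rest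
-- ===== Notes on version B (the rewrite author's own statement) =====
-- stated objective: alternative
-- what changed: Replaced the two back-to-front scans that pop(i) matching elements out of the input list by a single forward pass classifying into three buckets (TP / EQ / rest), concatenated with the TP and EQ buckets reversed; intended as asymptotically better (A's pops are O(n^2) worst case, B is O(n)) but a timing run measured only about 1.3x at the largest size, so no speed is claimed; A mutates file_names in place while B does not (return values agree).
import Mathlib
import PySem

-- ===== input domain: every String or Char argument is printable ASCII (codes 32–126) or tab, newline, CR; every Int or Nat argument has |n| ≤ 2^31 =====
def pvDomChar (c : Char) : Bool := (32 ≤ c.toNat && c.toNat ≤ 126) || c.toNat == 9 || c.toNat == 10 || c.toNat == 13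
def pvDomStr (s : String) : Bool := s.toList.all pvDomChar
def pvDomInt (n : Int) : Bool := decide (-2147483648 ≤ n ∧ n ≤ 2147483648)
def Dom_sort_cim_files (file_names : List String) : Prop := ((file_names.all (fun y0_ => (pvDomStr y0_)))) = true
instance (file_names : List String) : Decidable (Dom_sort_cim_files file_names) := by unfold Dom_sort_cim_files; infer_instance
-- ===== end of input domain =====

-- B replaces A's two back-to-front pop(i) scans by one forward pass into three buckets
-- (intended as faster; measured only ~1.3x at the largest size, so no speed is claimed).
-- A mutates its argument in place, B does not: the equivalence proved here is about the
-- RETURN value only.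

-- ===== PORT A =====
-- for i in range(nn-1, -1, -1): f = file_names[i]; if p f: lst.append(file_names.pop(i))
-- transliterated as a countdown recursion on i over the state (file_names, lst);
-- pyGet?/pop? can return none only out of range, which this loop never reaches
-- (i stays below the current length), so the none-branches leave the state unchanged.
def pvPassA (p : String → Bool) : Nat → List String × List String → List String × List String
  | 0, st => st
  | i + 1, (files, lst) =>
    match PySem.List.pyGet? files (i : Int) with
    | none => (files, lst)          -- unreachable: i < files.length throughout
    | some f =>
      if p f then
        match PySem.List.pop? files (i : Int) with
        | none => (files, lst)      -- unreachable likewise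
        | some (x, files') => pvPassA p i (files', lst ++ [x])
      else pvPassA p i (files, lst)

def pvCondTP (f : String) : Bool := PySem.Str.isIn "TP" f || PySem.Str.isIn "TPDB" f
def pvCondEQ (f : String) : Bool := PySem.Str.isIn "EQ" f || PySem.Str.isIn "EQBD" f

def sort_cim_files (file_names : List String) : List String :=
  let st1 := pvPassA pvCondTP file_names.length (file_names, [])
  let st2 := pvPassA pvCondEQ st1.1.length (st1.1, st1.2)
  st2.2 ++ st2.1

-- ===== PORT B =====
-- single forward pass into three buckets; tp[::-1] / eq[::-1] is List.reverse
-- (PySem.List.slice?_none_none_neg_one).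
def pvStepB (st : List String × List String × List String) (f : String) :
    List String × List String × List String :=
  if PySem.Str.isIn "TP" f then (st.1 ++ [f], st.2.1, st.2.2)
  else if PySem.Str.isIn "EQ" f then (st.1, st.2.1 ++ [f], st.2.2)
  else (st.1, st.2.1, st.2.2 ++ [f])

def sort_cim_files_alt (file_names : List String) : List String :=
  let st := file_names.foldl pvStepB ([], [], [])
  st.1.reverse ++ st.2.1.reverse ++ st.2.2

-- ===== PRECONDITION & SPEC =====
def Spec_sort_cim_files (file_names : List String) (out : List String) : Prop := out = sort_cim_files_alt file_names
instance (file_names : List String) (out : List String) : Decidable (Spec_sort_cim_files file_names out) := by unfold Spec_sort_cim_files; infer_instance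

-- ===== CLAIM (what is proved, stated in full; the proofs are below) =====
def Claim_equal_sort_cim_files : Prop := ∀ (file_names : List String), Dom_sort_cim_files file_names → Spec_sort_cim_files file_names (sort_cim_files file_names)

-- ===== LEMMAS AND PROOFS =====

-- A's pass, run on the first ys.length indices of ys ++ zs, filters ys:
-- the kept elements stay in front of zs, the popped ones are appended in reverse order.
theorem pvPassA_spec (p : String → Bool) :
    ∀ (ys zs lst : List String),
      pvPassA p ys.length (ys ++ zs, lst)
        = (ys.filter (fun f => !p f) ++ zs, lst ++ (ys.filter p).reverse) := by
  intro ys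
  induction ys using List.reverseRecOn with
  | nil => intro zs lst; simp [pvPassA]
  | append_singleton ys' y ih =>
    intro zs lst
    have hlen : (ys' ++ [y]).length = ys'.length + 1 := by simp
    rw [hlen]
    have hget : PySem.List.pyGet? ((ys' ++ [y]) ++ zs) (ys'.length : Int) = some y := by
      rw [List.append_assoc]; exact PySem.List.pyGet?_append_length ys' zs y
    by_cases hp : p y = true
    · have hpop : PySem.List.pop? ((ys' ++ [y]) ++ zs) (ys'.length : Int)
          = some (y, ys' ++ zs) := by
        have hl : ys'.length < ((ys' ++ [y]) ++ zs).length := by simp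
        rw [PySem.List.pop?_natCast _ _ hl]
        simp only [Prod.mk.injEq, Option.some.injEq]
        refine ⟨?_, ?_⟩
        · simp [List.getElem_append_right]
        · rw [List.append_assoc, List.eraseIdx_append_of_length_le (by omega)]
          simp
      simp only [pvPassA, hget, hp, if_true, hpop]
      rw [ih zs (lst ++ [y])]
      simp [List.filter_append, hp]
    · simp only [pvPassA, hget, hp]
      have : ((ys' ++ [y]) ++ zs) = ys' ++ (y :: zs) := by simp
      rw [this, ih (y :: zs) lst]
      simp [List.filter_append, hp]

-- 'TPDB' contains 'TP' and 'EQBD' contains 'EQ', so A's disjunctions collapse.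
theorem pvCondTP_eq (f : String) : pvCondTP f = PySem.Str.isIn "TP" f := by
  unfold pvCondTP
  by_cases h : PySem.Chars.isIn ['T', 'P'] f.toList = true
  · simp [h]
  · rw [Bool.not_eq_true] at h
    have hDB : PySem.Chars.isIn ['T', 'P', 'D', 'B'] f.toList = false := by
      by_contra hne
      rw [Bool.not_eq_false] at hne
      have hinf : ['T', 'P', 'D', 'B'] <:+: f.toList := (PySem.Chars.isIn_iff_infix _ _).mp hne
      have hsub : ['T', 'P'] <:+: ['T', 'P', 'D', 'B'] := by decide
      have : PySem.Chars.isIn ['T', 'P'] f.toList = true :=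
        (PySem.Chars.isIn_iff_infix _ _).mpr (hsub.trans hinf)
      rw [h] at this; exact Bool.false_ne_true this
    simp [h, hDB]

theorem pvCondEQ_eq (f : String) : pvCondEQ f = PySem.Str.isIn "EQ" f := by
  unfold pvCondEQ
  by_cases h : PySem.Chars.isIn ['E', 'Q'] f.toList = true
  · simp [h]
  · rw [Bool.not_eq_true] at h
    have hDB : PySem.Chars.isIn ['E', 'Q', 'B', 'D'] f.toList = false := by
      by_contra hne
      rw [Bool.not_eq_false] at hne
      have hinf : ['E', 'Q', 'B', 'D'] <:+: f.toList := (PySem.Chars.isIn_iff_infix _ _).mp hne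
      have hsub : ['E', 'Q'] <:+: ['E', 'Q', 'B', 'D'] := by decide
      have : PySem.Chars.isIn ['E', 'Q'] f.toList = true :=
        (PySem.Chars.isIn_iff_infix _ _).mpr (hsub.trans hinf)
      rw [h] at this; exact Bool.false_ne_true this
    simp [h, hDB]

-- B's fold appends each element to exactly one of the three buckets.
theorem pvFoldB_spec :
    ∀ (files tp eq rest : List String),
      files.foldl pvStepB (tp, eq, rest)
      = (tp ++ files.filter (fun f => PySem.Str.isIn "TP" f),
         eq ++ files.filter (fun f => !PySem.Str.isIn "TP" f && PySem.Str.isIn "EQ" f),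
         rest ++ files.filter (fun f => !PySem.Str.isIn "TP" f && !PySem.Str.isIn "EQ" f)) := by
  intro files
  induction files with
  | nil => intro tp eq rest; simp
  | cons f fs ih =>
    intro tp eq rest
    simp only [List.foldl_cons]
    by_cases h1 : PySem.Chars.isIn ['T', 'P'] f.toList = true
    · rw [show pvStepB (tp, eq, rest) f = (tp ++ [f], eq, rest) by simp [pvStepB, h1], ih]
      simp [h1]
    · by_cases h2 : PySem.Chars.isIn ['E', 'Q'] f.toList = true
      · rw [show pvStepB (tp, eq, rest) f = (tp, eq ++ [f], rest) by simp [pvStepB, h1, h2], ih]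
        simp [h1, h2]
      · rw [show pvStepB (tp, eq, rest) f = (tp, eq, rest ++ [f]) by simp [pvStepB, h1, h2], ih]
        simp [h1, h2]

-- ===== VERDICT (by name: the statement is the Claim_ definition above) =====
theorem sort_cim_files_spec : Claim_equal_sort_cim_files := by
  intro file_names _
  unfold Spec_sort_cim_files sort_cim_files sort_cim_files_alt
  have h1 := pvPassA_spec pvCondTP file_names [] []
  rw [List.append_nil] at h1
  have h2 := pvPassA_spec pvCondEQ (file_names.filter (fun f => !pvCondTP f)) []
      ([] ++ (file_names.filter pvCondTP).reverse)
  rw [List.append_nil] at h2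
  simp only [List.nil_append] at h2
  simp only [h1, List.nil_append, List.append_nil, h2, pvFoldB_spec, List.filter_filter]
  rw [List.filter_congr (fun f _ => by rw [pvCondTP_eq]),
      List.filter_congr (l := file_names) (p := fun a => pvCondEQ a && !pvCondTP a)
        (q := fun f => !PySem.Str.isIn "TP" f && PySem.Str.isIn "EQ" f)
        (fun f _ => by simp only [pvCondTP_eq, pvCondEQ_eq, Bool.and_comm]),
      List.filter_congr (l := file_names) (p := fun a => !pvCondEQ a && !pvCondTP a)
        (q := fun f => !PySem.Str.isIn "TP" f && !PySem.Str.isIn "EQ" f)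
        (fun f _ => by simp only [pvCondTP_eq, pvCondEQ_eq, Bool.and_comm])]
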